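-- pv_equiv track=rewrite | github.com/Zhavi221/atlas-utilization | services/calculations/combinatorics.py | make_objects_categories
-- ===== SOURCE A (Python) =====
-- import itertools
-- from typing import Dict, List, Iterator
--
-- def make_objects_categories(
--     object_types: List[str],
--     min_n: int = 2,
--     max_n: int = 4
-- ) -> List[Dict[str, int]]:
--     """
--     Enumerate all event categories where each object type
--     has between min_n and max_n entries.
--     """
--     limits = [range(min_n, max_n + 1) for _ in object_types]
--     categories = []
--     for counts in itertools.product(*limits):
--         categories.append(dict(zip(object_types, counts)))
--     return categories
-- ===== SOURCE B (Python) =====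
-- def make_objects_categories(object_types, min_n=2, max_n=4):
--     """
--     Enumerate all event categories where each object type
--     has between min_n and max_n entries, by ranking: each category is the
--     base-k (k = range width) decoding of its index, most significant digit first.
--     """
--     n = len(object_types)
--     k = max_n - min_n + 1
--     if k <= 0:
--         return [{}] if n == 0 else []
--     categories = []
--     for idx in range(k ** n):
--         d = {}
--         p = k ** n
--         for t in object_types:
--             p //= k
--             d[t] = min_n + idx // p % k
--         categories.append(d)
--     return categories
-- ===== Notes on version B (the rewrite author's own statement) =====
-- stated objective: alternative
-- what changed: Replaces the itertools.product enumeration of count tuples with ranking: for each index in range(k**n) the category is computed directly as the base-k digit decoding of that index (most significant digit first), so no product of pools is ever materialised.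
import Mathlib
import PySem

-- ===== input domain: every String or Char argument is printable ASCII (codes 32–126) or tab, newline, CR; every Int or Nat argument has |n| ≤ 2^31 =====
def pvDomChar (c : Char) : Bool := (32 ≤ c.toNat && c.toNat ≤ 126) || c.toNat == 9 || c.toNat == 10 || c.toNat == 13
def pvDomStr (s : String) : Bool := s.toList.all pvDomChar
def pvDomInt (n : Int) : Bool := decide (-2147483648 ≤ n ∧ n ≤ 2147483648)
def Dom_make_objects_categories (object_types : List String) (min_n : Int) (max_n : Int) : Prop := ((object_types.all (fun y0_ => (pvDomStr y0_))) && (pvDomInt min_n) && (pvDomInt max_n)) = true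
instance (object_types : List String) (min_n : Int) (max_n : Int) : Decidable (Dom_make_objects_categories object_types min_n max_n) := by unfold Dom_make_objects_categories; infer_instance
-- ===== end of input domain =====

-- B replaces the itertools.product enumeration by ranking: category #idx is the base-k
-- decoding of idx (k = range width), most significant digit first (objective: alternative, same cost).

-- ===== PORT A =====
-- itertools.product(*limits), ported per its documented semantics: a left fold that
-- extends each partial tuple by every element of the next pool.
def pyProduct (pools : List (List Int)) : List (List Int) :=
  pools.foldl (fun acc pool => acc.flatMap (fun r => pool.map (fun x => r ++ [x]))) [[]]

def make_objects_categories (object_types : List String) (min_n : Int) (max_n : Int) : List (List (String × Int)) :=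
  let limits := object_types.map (fun _ => PySem.List.pyRange min_n (max_n + 1) 1)
  (pyProduct limits).foldl
    (fun categories counts =>
      categories ++ [(PySem.Dict.ofList (List.zip object_types counts)).items])
    []

-- ===== PORT B =====
-- Source B: idx runs over range(k**n); the inner loop keeps p (p //= k each step) and
-- inserts min_n + idx // p % k for each type, building the dict in key order.
def make_objects_categories_alt (object_types : List String) (min_n : Int) (max_n : Int) : List (List (String × Int)) :=
  let n := object_types.length
  let k := max_n - min_n + 1
  if k ≤ 0 then (if n = 0 then [[]] else []) else
  (PySem.List.pyRange 0 (k ^ n) 1).foldl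
    (fun categories idx =>
      let dp :=
        object_types.foldl
          (fun (acc : PySem.Dict String Int × Int) t =>
            let p := PySem.Int.floordiv acc.2 k
            (acc.1.insert t (min_n + PySem.Int.mod (PySem.Int.floordiv idx p) k), p))
          (PySem.Dict.empty, k ^ n)
      categories ++ [dp.1.items])
    []

-- ===== PRECONDITION & SPEC =====
def Spec_make_objects_categories (object_types : List String) (min_n : Int) (max_n : Int) (out : List (List (String × Int))) : Prop := out = make_objects_categories_alt object_types min_n max_n
instance (object_types : List String) (min_n : Int) (max_n : Int) (out : List (List (String × Int))) : Decidable (Spec_make_objects_categories object_types min_n max_n out) := by unfold Spec_make_objects_categories; infer_instance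

-- ===== CLAIM (what is proved, stated in full; the proofs are below) =====
def Claim_equal_make_objects_categories : Prop := ∀ (object_types : List String) (min_n : Int) (max_n : Int), Dom_make_objects_categories object_types min_n max_n → Spec_make_objects_categories object_types min_n max_n (make_objects_categories object_types min_n max_n)

-- ===== LEMMAS AND PROOFS =====

-- recursive characterisation of the product of a list of pools
def prodR {α : Type} : List (List α) → List (List α)
  | [] => [[]]
  | p :: ps => p.flatMap (fun x => (prodR ps).map (fun rest => x :: rest))

theorem pyProduct_foldl_eq (pools : List (List Int)) (acc : List (List Int)) :
    pools.foldl (fun acc pool => acc.flatMap (fun r => pool.map (fun x => r ++ [x]))) acc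
      = acc.flatMap (fun r => (prodR pools).map (fun t => r ++ t)) := by
  induction pools generalizing acc with
  | nil => simp [prodR]
  | cons p ps ih =>
    simp only [List.foldl_cons, ih, prodR]
    simp [List.flatMap_assoc, List.map_flatMap, List.flatMap_map, List.map_map,
      Function.comp_def, List.append_assoc]

theorem pyProduct_eq_prodR (pools : List (List Int)) : pyProduct pools = prodR pools := by
  simp [pyProduct, pyProduct_foldl_eq]

theorem prodR_map {α β : Type} (f : α → β) (ls : List (List α)) :
    prodR (ls.map (List.map f)) = (prodR ls).map (List.map f) := by
  induction ls with
  | nil => simp [prodR]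
  | cons p ps ih =>
    simp [prodR, ih, List.map_flatMap, List.flatMap_map, List.map_map, Function.comp_def]

-- A is the dict-items map over the recursive product of its pools
theorem A_eq (types : List String) (mn mx : Int) :
    make_objects_categories types mn mx
      = (prodR (types.map (fun _ => PySem.List.pyRange mn (mx + 1) 1))).map
          (fun counts => (PySem.Dict.ofList (List.zip types counts)).items) := by
  show (pyProduct (types.map (fun _ => PySem.List.pyRange mn (mx + 1) 1))).foldl
      (fun categories counts => categories ++ [(PySem.Dict.ofList (List.zip types counts)).items]) []
    = _
  rw [pyProduct_eq_prodR, PySem.List.foldl_append_singleton_eq_map, List.nil_append]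

-- base-K digits of m, most significant first (e digits)
def digsN (K : Nat) (m : Nat) : Nat → List Nat
  | 0 => []
  | e + 1 => (m / K ^ e % K) :: digsN K m e

theorem range_mul_flatMap (a b : Nat) :
    List.range (a * b) = (List.range a).flatMap (fun d => (List.range b).map (fun r => d * b + r)) := by
  induction a with
  | zero => simp
  | succ a ih =>
    rw [Nat.succ_mul, List.range_add, List.range_succ, ih]
    simp [List.flatMap_append]

theorem digsN_add_mul (K d r n : Nat) (hr : r < K ^ n) :
    ∀ e, e ≤ n → digsN K (d * K ^ n + r) e = digsN K r e := by
  intro e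
  induction e with
  | zero => intro _; rfl
  | succ e ih =>
    intro he
    have hn : 0 < n := by omega
    have hK : 0 < K := by
      rcases Nat.eq_zero_or_pos K with h | h
      · subst h; rw [Nat.zero_pow (by omega)] at hr; omega
      · exact h
    rw [digsN, digsN, ih (by omega)]
    have hdiv : (d * K ^ n + r) / K ^ e = r / K ^ e + d * K ^ (n - e) := by
      have h1 : d * K ^ n = d * K ^ (n - e) * K ^ e := by
        rw [mul_assoc, ← pow_add]; congr 2; omega
      rw [h1, Nat.add_comm, Nat.add_mul_div_right _ _ (Nat.pow_pos hK)]
    rw [hdiv]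
    have h2 : d * K ^ (n - e) = d * K ^ (n - e - 1) * K := by
      rw [mul_assoc, ← pow_succ]; congr 2; omega
    rw [h2, Nat.add_mul_mod_self_right]

theorem digsN_decomp (K d r n : Nat) (hd : d < K) (hr : r < K ^ n) :
    digsN K (d * K ^ n + r) (n + 1) = d :: digsN K r n := by
  have hK : 0 < K := by omega
  rw [digsN]
  congr 1
  · rw [Nat.add_comm, Nat.add_mul_div_right _ _ (Nat.pow_pos hK), Nat.div_eq_of_lt hr]
    simp [Nat.mod_eq_of_lt hd]
  · exact digsN_add_mul K d r n hr n (Nat.le_refl n)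

-- ranking enumerates the product: decoding every index 0..K^n-1 gives exactly prodR
theorem mainN (K : Nat) (n : Nat) :
    (List.range (K ^ n)).map (fun m => digsN K m n)
      = prodR (List.replicate n (List.range K)) := by
  induction n with
  | zero => simp [digsN, prodR]
  | succ n ih =>
    rw [show K ^ (n + 1) = K * K ^ n from by ring, range_mul_flatMap,
      List.map_flatMap, List.replicate_succ]
    simp only [prodR, ← ih, List.map_map, Function.comp_def]
    apply List.flatMap_congr
    intro d hd
    apply List.map_congr_left
    intro r hr
    exact digsN_decomp K d r n (List.mem_range.mp hd) (List.mem_range.mp hr)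

-- the Int-valued digits B's inner loop emits, most significant first
def digsI (k min_n idx : Int) : Nat → List Int
  | 0 => []
  | e + 1 => (min_n + PySem.Int.mod (PySem.Int.floordiv idx (k ^ e)) k) :: digsI k min_n idx e

theorem digsI_cast (K : Nat) (min_n : Int) (m : Nat) :
    ∀ e, digsI (K : Int) min_n (m : Int) e
      = (digsN K m e).map (fun a : Nat => min_n + (a : Int)) := by
  intro e
  induction e with
  | zero => rfl
  | succ e ih =>
    rw [digsI, digsN, List.map_cons, ih]
    congr 2
    rw [show ((K : Int)) ^ e = ((K ^ e : Nat) : Int) from by push_cast; ring]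
    rw [PySem.Int.floordiv_natCast, PySem.Int.mod_natCast]

theorem pow_floordiv (k : Int) (hk : 0 < k) (e : Nat) :
    PySem.Int.floordiv (k ^ (e + 1)) k = k ^ e := by
  rw [PySem.Int.floordiv_eq_ediv_of_pos hk, pow_succ, Int.mul_ediv_cancel _ (by omega)]

-- B's inner loop over the types is the dict-insert fold over zip types (digits)
theorem inner_fold_eq (k min_n : Int) (hk : 0 < k) (idx : Int) :
    ∀ (ts : List String) (d : PySem.Dict String Int),
      (ts.foldl
          (fun (acc : PySem.Dict String Int × Int) t =>
            (acc.1.insert t (min_n + PySem.Int.mod (PySem.Int.floordiv idx (PySem.Int.floordiv acc.2 k)) k),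
              PySem.Int.floordiv acc.2 k))
          (d, k ^ ts.length)).1
        = (List.zip ts (digsI k min_n idx ts.length)).foldl (fun d p => d.insert p.1 p.2) d := by
  intro ts
  induction ts with
  | nil => intro d; rfl
  | cons t ts ih =>
    intro d
    rw [List.length_cons, digsI, List.zip_cons_cons, List.foldl_cons, List.foldl_cons,
      pow_floordiv k hk ts.length]
    exact ih (d.insert t (min_n + PySem.Int.mod (PySem.Int.floordiv idx (k ^ ts.length)) k))

theorem ofList_eq_foldl (pairs : List (String × Int)) :
    PySem.Dict.ofList pairs = pairs.foldl (fun d p => d.insert p.1 p.2) PySem.Dict.empty := rfl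

-- B, when the range is nonempty, is the dict-items map over the decoded indices
theorem B_eq (types : List String) (mn mx : Int) (hk : 0 < mx - mn + 1) :
    make_objects_categories_alt types mn mx
      = (List.range ((mx - mn + 1).toNat ^ types.length)).map
          (fun m : Nat =>
            (PySem.Dict.ofList
              (List.zip types
                ((digsN (mx - mn + 1).toNat m types.length).map (fun a : Nat => mn + (a : Int))))).items) := by
  unfold make_objects_categories_alt
  rw [if_neg (by omega), PySem.List.foldl_append_singleton_eq_map, List.nil_append]
  have hpow : ((mx - mn + 1) ^ types.length - 0).toNat = (mx - mn + 1).toNat ^ types.length := by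
    rw [sub_zero]
    exact Int.toNat_pow_of_nonneg (by omega) types.length
  rw [PySem.List.pyRange_one, hpow, List.map_map]
  apply List.map_congr_left
  intro m _
  simp only [zero_add]
  show (types.foldl
      (fun (acc : PySem.Dict String Int × Int) t =>
        (acc.1.insert t (mn + PySem.Int.mod (PySem.Int.floordiv (m : Int) (PySem.Int.floordiv acc.2 (mx - mn + 1))) (mx - mn + 1)),
          PySem.Int.floordiv acc.2 (mx - mn + 1)))
      (PySem.Dict.empty, (mx - mn + 1) ^ types.length)).1.items = _
  rw [inner_fold_eq (mx - mn + 1) mn hk (m : Int) types PySem.Dict.empty]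
  rw [ofList_eq_foldl]
  rw [show (mx - mn + 1) = (((mx - mn + 1).toNat : Nat) : Int) from by omega, digsI_cast,
    Int.toNat_natCast]

theorem counts_eq (K : Nat) (mn : Int) (n : Nat) :
    (List.range (K ^ n)).map (fun m => (digsN K m n).map (fun a : Nat => mn + (a : Int)))
      = prodR (List.replicate n ((List.range K).map (fun a : Nat => mn + (a : Int)))) := by
  rw [← List.map_replicate, prodR_map, ← mainN, List.map_map]
  rfl

theorem map_const_replicate {α β : Type} (l : List α) (b : β) :
    l.map (fun _ => b) = List.replicate l.length b := by
  induction l with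
  | nil => rfl
  | cons x xs ih => simp [List.replicate_succ, ih]

-- ===== VERDICT (by name: the statement is the Claim_ definition above) =====
theorem make_objects_categories_spec : Claim_equal_make_objects_categories := by
  intro types mn mx _
  unfold Spec_make_objects_categories
  by_cases hk : mx - mn + 1 ≤ 0
  · have hpool : PySem.List.pyRange mn (mx + 1) 1 = [] := by
      rw [PySem.List.pyRange_one, show (mx + 1 - mn).toNat = 0 from by omega]
      rfl
    rw [A_eq]
    unfold make_objects_categories_alt
    rw [if_pos hk]
    cases types with
    | nil => rfl
    | cons t ts =>
      rw [if_neg (by simp), List.map_cons, hpool]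
      simp [prodR]
  · rw [A_eq, B_eq types mn mx (by omega)]
    rw [show (List.range ((mx - mn + 1).toNat ^ types.length)).map
          (fun m : Nat =>
            (PySem.Dict.ofList
              (List.zip types
                ((digsN (mx - mn + 1).toNat m types.length).map (fun a : Nat => mn + (a : Int))))).items)
        = ((List.range ((mx - mn + 1).toNat ^ types.length)).map
            (fun m : Nat => (digsN (mx - mn + 1).toNat m types.length).map (fun a : Nat => mn + (a : Int)))).map
              (fun counts => (PySem.Dict.ofList (List.zip types counts)).items) from by
      rw [List.map_map]; rfl]
    rw [counts_eq, map_const_replicate]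
    congr 2
    rw [PySem.List.pyRange_one, show (mx + 1 - mn).toNat = (mx - mn + 1).toNat from by omega]
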